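-- pv_equiv track=rewrite | github.com/JuanmaGuzman/CAPSTONE_backenc | src/publications/helpers/suggestions.py | size_identity_class_representative
-- ===== SOURCE A (Python) =====
-- from typing import Union, Iterable
--
-- _SIZE_IDENTITY_CLASSES = {
--     'xs': {'xs', '36'},
--     's': {'s', '38', '40'},
--     'm': {'m', '42', '44'},
--     'l': {'l', '46', '48'},
--     'xl': {'xl', '50', '52'},
--     'xxl': {'xxl', '54'}
-- }
--
-- def size_identity_class_representative(
--     size: Union[str, None]
-- ) -> Union[str, None]:
--     if size == '':
--         return None
--     for rep, size_class in _SIZE_IDENTITY_CLASSES.items():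
--         if size in size_class:
--             return rep
-- ===== SOURCE B (Python) =====
-- _SIZE_IDENTITY_CLASSES = {
--     'xs': {'xs', '36'},
--     's': {'s', '38', '40'},
--     'm': {'m', '42', '44'},
--     'l': {'l', '46', '48'},
--     'xl': {'xl', '50', '52'},
--     'xxl': {'xxl', '54'}
-- }
--
-- _REVERSE_MAP = {
--     member: rep
--     for rep, size_class in _SIZE_IDENTITY_CLASSES.items()
--     for member in size_class
-- }
--
-- def size_identity_class_representative(size):
--     return _REVERSE_MAP.get(size)
-- ===== Notes on version B (the rewrite author's own statement) =====
-- stated objective: idiomatic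
-- what changed: A's loop over classes with a per-class membership test is replaced by a flat member-to-representative dict built once at module level, so the body is a single .get lookup with no loop and no empty-string special case (the empty string is not a key, so .get already yields None there, as does a None argument).
import Mathlib
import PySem

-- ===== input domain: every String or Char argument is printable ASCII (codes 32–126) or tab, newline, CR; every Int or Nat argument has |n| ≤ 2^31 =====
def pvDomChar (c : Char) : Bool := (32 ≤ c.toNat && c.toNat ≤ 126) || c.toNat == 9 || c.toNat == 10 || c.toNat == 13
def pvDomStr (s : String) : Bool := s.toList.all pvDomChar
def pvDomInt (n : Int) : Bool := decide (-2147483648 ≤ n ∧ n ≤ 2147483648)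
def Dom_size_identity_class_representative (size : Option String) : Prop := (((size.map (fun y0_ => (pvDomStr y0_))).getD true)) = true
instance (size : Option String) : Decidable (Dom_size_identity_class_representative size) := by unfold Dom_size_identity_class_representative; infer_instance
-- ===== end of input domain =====

-- B replaces A's loop over classes with a one-time flat member->representative map and a single lookup (idiomatic; return value only).

-- ===== PORT A =====
-- the module-level dict of sets, in insertion order (set membership is order-insensitive)
def pvSizeClasses : List (String × List String) :=
  [("xs", ["xs", "36"]),
   ("s", ["s", "38", "40"]),
   ("m", ["m", "42", "44"]),
   ("l", ["l", "46", "48"]),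
   ("xl", ["xl", "50", "52"]),
   ("xxl", ["xxl", "54"])]

-- the for-loop: first class containing size wins; `None in set-of-strings` is False
def pvLoopA (size : Option String) : List (String × List String) → Option String
  | [] => none
  | (rep, cls) :: rest =>
      if (match size with | some s => cls.contains s | none => false) then some rep
      else pvLoopA size rest

def size_identity_class_representative (size : Option String) : Option String :=
  if size = some "" then none
  else pvLoopA size pvSizeClasses

-- ===== PORT B =====
-- the dict comprehension: flat member -> representative map built once
def pvReverseMap : PySem.Dict String String :=
  PySem.Dict.ofList
    (pvSizeClasses.flatMap (fun rc => rc.2.map (fun member => (member, rc.1))))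

-- _REVERSE_MAP.get(size): a None key matches no string key, so .get returns None
def size_identity_class_representative_alt (size : Option String) : Option String :=
  match size with
  | none => none
  | some s => pvReverseMap.get? s

-- ===== PRECONDITION & SPEC =====
def Spec_size_identity_class_representative (size : Option String) (out : Option String) : Prop := out = size_identity_class_representative_alt size
instance (size : Option String) (out : Option String) : Decidable (Spec_size_identity_class_representative size out) := by unfold Spec_size_identity_class_representative; infer_instance

-- ===== CLAIM (what is proved, stated in full; the proofs are below) =====
def Claim_equal_size_identity_class_representative : Prop := ∀ (size : Option String), Dom_size_identity_class_representative size → Spec_size_identity_class_representative size (size_identity_class_representative size)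

-- ===== LEMMAS AND PROOFS =====
set_option maxHeartbeats 2000000 in
set_option maxRecDepth 20000 in
theorem pv_eq_some (s : String) :
    size_identity_class_representative (some s) = size_identity_class_representative_alt (some s) := by
  have hmap : pvReverseMap = PySem.Dict.mk [("xs", "xs"), ("36", "xs"), ("s", "s"), ("38", "s"), ("40", "s"), ("m", "m"), ("42", "m"), ("44", "m"), ("l", "l"), ("46", "l"), ("48", "l"), ("xl", "xl"), ("50", "xl"), ("52", "xl"), ("xxl", "xxl"), ("54", "xxl")] := by decide
  simp only [size_identity_class_representative, size_identity_class_representative_alt,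
    hmap, pvSizeClasses, pvLoopA, PySem.Dict.get?_mk_cons]
  by_cases hxs : s = "xs"
  · subst hxs; decide
  by_cases h36 : s = "36"
  · subst h36; decide
  by_cases hs : s = "s"
  · subst hs; decide
  by_cases h38 : s = "38"
  · subst h38; decide
  by_cases h40 : s = "40"
  · subst h40; decide
  by_cases hm : s = "m"
  · subst hm; decide
  by_cases h42 : s = "42"
  · subst h42; decide
  by_cases h44 : s = "44"
  · subst h44; decide
  by_cases hl : s = "l"
  · subst hl; decide
  by_cases h46 : s = "46"
  · subst h46; decide
  by_cases h48 : s = "48"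
  · subst h48; decide
  by_cases hxl : s = "xl"
  · subst hxl; decide
  by_cases h50 : s = "50"
  · subst h50; decide
  by_cases h52 : s = "52"
  · subst h52; decide
  by_cases hxxl : s = "xxl"
  · subst hxxl; decide
  by_cases h54 : s = "54"
  · subst h54; decide
  by_cases h0 : s = ""
  · subst h0; decide
  simp only [List.contains_cons, List.contains_nil, (beq_eq_false_iff_ne.mpr hxs : (s == "xs") = false), (beq_eq_false_iff_ne.mpr (Ne.symm hxs) : ("xs" == s) = false), (beq_eq_false_iff_ne.mpr h36 : (s == "36") = false), (beq_eq_false_iff_ne.mpr (Ne.symm h36) : ("36" == s) = false), (beq_eq_false_iff_ne.mpr hs : (s == "s") = false), (beq_eq_false_iff_ne.mpr (Ne.symm hs) : ("s" == s) = false), (beq_eq_false_iff_ne.mpr h38 : (s == "38") = false), (beq_eq_false_iff_ne.mpr (Ne.symm h38) : ("38" == s) = false), (beq_eq_false_iff_ne.mpr h40 : (s == "40") = false), (beq_eq_false_iff_ne.mpr (Ne.symm h40) : ("40" == s) = false), (beq_eq_false_iff_ne.mpr hm : (s == "m") = false), (beq_eq_false_iff_ne.mpr (Ne.symm hm) : ("m"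 == s) = false), (beq_eq_false_iff_ne.mpr h42 : (s == "42") = false), (beq_eq_false_iff_ne.mpr (Ne.symm h42) : ("42" == s) = false), (beq_eq_false_iff_ne.mpr h44 : (s == "44") = false), (beq_eq_false_iff_ne.mpr (Ne.symm h44) : ("44" == s) = false), (beq_eq_false_iff_ne.mpr hl : (s == "l") = false), (beq_eq_false_iff_ne.mpr (Ne.symm hl) : ("l" == s) = false), (beq_eq_false_iff_ne.mpr h46 : (s == "46") = false), (beq_eq_false_iff_ne.mpr (Ne.symm h46) : ("46" == s) = false), (beq_eq_false_iff_ne.mpr h48 : (s == "48") = false), (beq_eq_false_iff_ne.mpr (Ne.symm h48) : ("48" == s) = false), (beq_eq_false_iff_ne.mpr hxl : (s == "xl") = false), (beq_eq_false_iff_ne.mpr (Ne.symm hxl) : ("xl" == s) = false), (beq_eq_false_iff_ne.mpr h50 : (s == "50") = false), (beq_eq_false_iff_ne.mpr (Ne.symm h50) : ("50" == s) = false), (beq_eq_false_iff_ne.mpr h52 : (s == "52") = false), (beq_eq_false_iff_ne.mpr (Ne.symm h52) : ("52" == s) = false), (beq_eq_false_iff_ne.mpr hxxl : (s == "xxl")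 = false), (beq_eq_false_iff_ne.mpr (Ne.symm hxxl) : ("xxl" == s) = false), (beq_eq_false_iff_ne.mpr h54 : (s == "54") = false), (beq_eq_false_iff_ne.mpr (Ne.symm h54) : ("54" == s) = false),
    Bool.or_self, Bool.false_or]
  simp [h0, PySem.Dict.get?]

-- ===== VERDICT (by name: the statement is the Claim_ definition above) =====
theorem size_identity_class_representative_spec : Claim_equal_size_identity_class_representative := by
  intro size _
  unfold Spec_size_identity_class_representative
  cases size with
  | none => rfl
  | some s => exact pv_eq_some s
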